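-- pv_equiv track=rewrite | github.com/uddaniiii/coding-test | 프로그래머스/2/70129. 이진 변환 반복하기/이진 변환 반복하기.py | solution
-- ===== SOURCE A (Python) =====
-- def solution(s):
--     zero_cnt=0
--     cnt=0
--     while s!='1':
--         zero_cnt+=s.count('0')
--         s=s.replace('0','')
--         s=bin(len(s))[2:]
--         cnt+=1
--     return cnt,zero_cnt
-- ===== SOURCE B (Python) =====
-- def solution(s):
--     # Bottom-up DP tabulation: instead of following the conversion trajectory,
--     # fill tables popcount/bitlength/steps/zeros for every value 1..n in one
--     # forward pass (pc[k] < k for k > 1, so steps[pc[k]] is already computed),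
--     # then read the answer off the tables.
--     if s == '1':
--         return (0, 0)
--     zeros0 = s.count('0')
--     n = len(s) - zeros0          # value after the first conversion
--     pc = [0] * (n + 1)           # pc[k]  = popcount(k)
--     bl = [0] * (n + 1)           # bl[k]  = bit length of k
--     steps = [0] * (n + 1)        # steps[k] = conversions needed from value k to 1
--     zer = [0] * (n + 1)          # zer[k]   = zeros removed on the way from k to 1
--     for k in range(1, n + 1):
--         pc[k] = pc[k >> 1] + (k & 1)
--         bl[k] = bl[k >> 1] + 1
--         if k > 1:
--             steps[k] = steps[pc[k]] + 1
--             zer[k] = zer[pc[k]] + (bl[k] - pc[k])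
--     return (1 + steps[n], zeros0 + zer[n])
-- ===== Notes on version B (the rewrite author's own statement) =====
-- stated objective: alternative
-- what changed: B replaces A's trajectory-following string loop (replace/bin each pass) with a bottom-up DP that tabulates popcount, bit length, step count and removed zeros for every value 1..n in one forward pass, then reads the answer from the tables.
-- outside the precondition, e.g. on solution('0'): A does not finish within the time limit, B returns (1, 1)
import Mathlib
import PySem

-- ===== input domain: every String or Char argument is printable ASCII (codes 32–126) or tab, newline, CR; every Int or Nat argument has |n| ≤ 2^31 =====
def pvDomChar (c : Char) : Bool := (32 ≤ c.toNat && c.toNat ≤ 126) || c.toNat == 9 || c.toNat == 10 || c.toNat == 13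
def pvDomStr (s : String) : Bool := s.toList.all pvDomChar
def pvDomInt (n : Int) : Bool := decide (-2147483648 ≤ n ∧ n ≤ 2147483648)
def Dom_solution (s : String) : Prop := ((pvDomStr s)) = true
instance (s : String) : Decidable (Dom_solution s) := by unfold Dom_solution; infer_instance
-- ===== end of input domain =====

-- B replaces A's trajectory-following string loop with a bottom-up DP tabulation over the
-- values 1..n (alternative decomposition; same return value on all terminating inputs).


-- ===== PORT A =====
-- bin(n)[2:] for a nonnegative int, as a list of chars (exact for n ≥ 0: most-significant bit
-- first, bin(0)[2:] = "0").
def binCharsAux (n : Nat) : List Char :=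
  if h : n = 0 then [] else binCharsAux (n / 2) ++ [if n % 2 = 1 then '1' else '0']
decreasing_by exact Nat.div_lt_self (Nat.pos_of_ne_zero h) (by norm_num)

def binChars (n : Nat) : List Char := if n = 0 then ['0'] else binCharsAux n

-- the while loop of A, state (s, zero_cnt, cnt); fuel is only a totality device: under
-- Pre_solution the loop terminates well within s.length + 2 iterations (never exhausted there).
def solutionLoop : Nat → List Char → Int → Int → Int × Int
  | 0, _, zc, c => (c, zc)
  | fuel + 1, s, zc, c =>
    if s = ['1'] then (c, zc)
    else
      let zc' := zc + (s.count '0' : Int)       -- zero_cnt += s.count('0')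
      let s' := s.filter (· ≠ '0')              -- s = s.replace('0','')
      solutionLoop fuel (binChars s'.length) zc' (c + 1)   -- s = bin(len(s))[2:]

def solution (s : String) : Int × Int := solutionLoop (s.toList.length + 2) s.toList 0 0

-- ===== PORT B =====
-- one iteration of Source B's table-filling loop; state = the four tables (pc, bl, steps, zer).
-- All table values are nonnegative Python ints, carried as Nat; list indexing is always in
-- range in Source B (k ≤ n, k >> 1 < k ≤ n, pc[k] < k for k > 1), ported as getD _ 0 (exact here).
def tabStep (st : List Nat × List Nat × List Nat × List Nat) (k : Nat) :
    List Nat × List Nat × List Nat × List Nat :=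
  let pck := st.1.getD (k / 2) 0 + k % 2                  -- pc[k] = pc[k >> 1] + (k & 1)
  let blk := st.2.1.getD (k / 2) 0 + 1                    -- bl[k] = bl[k >> 1] + 1
  let pc' := st.1.set k pck
  let bl' := st.2.1.set k blk
  if k > 1 then
    (pc', bl', st.2.2.1.set k (st.2.2.1.getD pck 0 + 1),  -- steps[k] = steps[pc[k]] + 1
      st.2.2.2.set k (st.2.2.2.getD pck 0 + (blk - pck))) -- zer[k] = zer[pc[k]] + (bl[k]-pc[k])
  else (pc', bl', st.2.2.1, st.2.2.2)

def solution_alt (s : String) : Int × Int :=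
  if s = "1" then (0, 0)
  else
    let zeros0 := s.toList.count '0'
    let n := s.toList.length - zeros0
    let z : List Nat := List.replicate (n + 1) 0          -- [0]*(n+1)
    -- for k in range(1, n+1): … — List.range' 1 n is exactly [1, …, n]
    let t := (List.range' 1 n).foldl tabStep (z, z, z, z)
    ((1 + t.2.2.1.getD n 0 : Nat), (zeros0 + t.2.2.2.getD n 0 : Nat))

-- ===== PRECONDITION & SPEC =====
-- Pre_ excludes exactly the strings whose every character is '0' (including the empty string):
-- on those A's while loop never terminates (Python hangs), so A returns no value there.
def Pre_solution (s : String) : Prop := (s.toList.any (· ≠ '0')) = true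
instance (s : String) : Decidable (Pre_solution s) := by unfold Pre_solution; infer_instance
def pvWitness_solution : String := "110010"

def Spec_solution (s : String) (out : Int × Int) : Prop := out = solution_alt s
instance (s : String) (out : Int × Int) : Decidable (Spec_solution s out) := by unfold Spec_solution; infer_instance

-- ===== CLAIM (what is proved, stated in full; the proofs are below) =====
def Claim_equal_solution : Prop := ∀ (s : String), Dom_solution s → Pre_solution s → Spec_solution s (solution s)

-- ===== LEMMAS AND PROOFS =====

-- mathematical popcount / bit length, and the trajectory functions stepsFn/zerFn
def popCount (n : Nat) : Nat :=
  if h : n = 0 then 0 else n % 2 + popCount (n / 2)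
decreasing_by exact Nat.div_lt_self (Nat.pos_of_ne_zero h) (by norm_num)

def bitLen (n : Nat) : Nat :=
  if h : n = 0 then 0 else bitLen (n / 2) + 1
decreasing_by exact Nat.div_lt_self (Nat.pos_of_ne_zero h) (by norm_num)

theorem popCount_zero : popCount 0 = 0 := by rw [popCount]; simp

theorem popCount_one : popCount 1 = 1 := by rw [popCount]; norm_num [popCount_zero]

theorem popCount_pos (n : Nat) (h : 1 ≤ n) : 1 ≤ popCount n := by
  induction n using Nat.strong_induction_on with
  | _ n ih =>
    rw [popCount]
    have hn : n ≠ 0 := by omega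
    simp only [dif_neg hn]
    by_cases h2 : n / 2 = 0
    · have : n % 2 = 1 := by omega
      omega
    · have := ih (n / 2) (Nat.div_lt_self (Nat.pos_of_ne_zero hn) (by norm_num)) (by omega)
      omega

theorem popCount_lt (n : Nat) (h : 2 ≤ n) : popCount n < n := by
  induction n using Nat.strong_induction_on with
  | _ n ih =>
    rw [popCount]
    have hn : n ≠ 0 := by omega
    simp only [dif_neg hn]
    by_cases h2 : n / 2 ≥ 2
    · have := ih (n / 2) (Nat.div_lt_self (Nat.pos_of_ne_zero hn) (by norm_num)) h2
      omega
    · have h3 : n / 2 = 1 := by omega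
      rw [h3, popCount_one]
      omega

theorem popCount_le_bitLen (n : Nat) : popCount n ≤ bitLen n := by
  induction n using Nat.strong_induction_on with
  | _ n ih =>
    rw [popCount, bitLen]
    by_cases h : n = 0
    · simp [h]
    · simp only [dif_neg h]
      have := ih (n / 2) (Nat.div_lt_self (Nat.pos_of_ne_zero h) (by norm_num))
      omega

-- conversions needed from value n to 1, and zeros removed on the way
def stepsFn (n : Nat) : Nat :=
  if h : n ≤ 1 then 0 else stepsFn (popCount n) + 1
decreasing_by exact popCount_lt n (by omega)

def zerFn (n : Nat) : Nat :=
  if h : n ≤ 1 then 0 else zerFn (popCount n) + (bitLen n - popCount n)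
decreasing_by exact popCount_lt n (by omega)

-- ---- A-side: the loop computes (c + stepsFn n, zc + zerFn n) ----

theorem binCharsAux_zero : binCharsAux 0 = [] := by rw [binCharsAux]; simp

theorem binCharsAux_length (n : Nat) : (binCharsAux n).length = bitLen n := by
  induction n using Nat.strong_induction_on with
  | _ n ih =>
    rw [binCharsAux, bitLen]
    by_cases h : n = 0
    · simp [h]
    · simp only [dif_neg h, List.length_append, List.length_cons, List.length_nil]
      rw [ih (n / 2) (Nat.div_lt_self (Nat.pos_of_ne_zero h) (by norm_num))]

theorem binCharsAux_count1 (n : Nat) : (binCharsAux n).count '1' = popCount n := by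
  induction n using Nat.strong_induction_on with
  | _ n ih =>
    rw [binCharsAux, popCount]
    by_cases h : n = 0
    · simp [h]
    · simp only [dif_neg h, List.count_append]
      rw [ih (n / 2) (Nat.div_lt_self (Nat.pos_of_ne_zero h) (by norm_num))]
      have h2 : n % 2 = 0 ∨ n % 2 = 1 := Nat.mod_two_eq_zero_or_one n
      rcases h2 with h2 | h2 <;> simp [h2] <;> omega

theorem binCharsAux_mem (n : Nat) (c : Char) (hc : c ∈ binCharsAux n) : c = '0' ∨ c = '1' := by
  induction n using Nat.strong_induction_on with
  | _ n ih =>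
    rw [binCharsAux] at hc
    by_cases h : n = 0
    · simp [h] at hc
    · simp only [dif_neg h, List.mem_append, List.mem_cons] at hc
      rcases hc with hc | hc
      · exact ih (n / 2) (Nat.div_lt_self (Nat.pos_of_ne_zero h) (by norm_num)) hc
      · rcases hc with hc | hc
        · split at hc <;> simp_all
        · simp at hc

theorem binCharsAux_count0 (n : Nat) :
    (binCharsAux n).count '0' = bitLen n - popCount n := by
  have h : (binCharsAux n).count '0' + (binCharsAux n).count '1' = (binCharsAux n).length := by
    induction n using Nat.strong_induction_on with
    | _ n ih =>
      rw [binCharsAux]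
      by_cases h : n = 0
      · simp [h]
      · simp only [dif_neg h, List.count_append, List.length_append]
        have := ih (n / 2) (Nat.div_lt_self (Nat.pos_of_ne_zero h) (by norm_num))
        have h2 : n % 2 = 0 ∨ n % 2 = 1 := Nat.mod_two_eq_zero_or_one n
        rcases h2 with h2 | h2 <;> simp [h2] <;> omega
  have h1 := binCharsAux_count1 n
  have h2 := binCharsAux_length n
  omega

theorem bitLen_two_le (n : Nat) (h : 2 ≤ n) : 2 ≤ bitLen n := by
  have h0 : n ≠ 0 := by omega
  have h1 : n / 2 ≠ 0 := by omega
  rw [bitLen, dif_neg h0, bitLen, dif_neg h1]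
  omega

theorem binChars_filter_length (n : Nat) (h : 1 ≤ n) :
    ((binChars n).filter (· ≠ '0')).length = popCount n := by
  rw [binChars, if_neg (by omega)]
  have h1 : ((binCharsAux n).filter (· ≠ '0')) = (binCharsAux n).filter (· == '1') := by
    apply List.filter_congr
    intro c hc
    rcases binCharsAux_mem n c hc with h0 | h0 <;> simp [h0]
  rw [h1, ← List.countP_eq_length_filter, ← binCharsAux_count1 n]
  rfl

theorem binChars_eq_one_iff (n : Nat) : binChars n = ['1'] ↔ n = 1 := by
  have haux1 : binCharsAux 1 = ['1'] := by
    rw [binCharsAux]; norm_num [binCharsAux_zero]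
  constructor
  · intro h
    rcases Nat.lt_or_ge n 2 with h2 | h2
    · interval_cases n
      · rw [binChars, if_pos rfl] at h
        exact absurd h (by decide)
      · rfl
    · exfalso
      have hl := binCharsAux_length n
      have hb : binChars n = binCharsAux n := by rw [binChars, if_neg (by omega)]
      rw [hb] at h
      have h3 := bitLen_two_le n h2
      rw [← hl, h] at h3
      simp at h3
  · intro h
    subst h
    rw [binChars, if_neg (by omega)]
    exact haux1

theorem binChars_count0 (n : Nat) (h : 1 ≤ n) :
    ((binChars n).count '0' : Int) = (bitLen n : Int) - (popCount n : Int) := by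
  rw [binChars, if_neg (by omega), binCharsAux_count0]
  have h1 := popCount_le_bitLen n
  omega

theorem loopA_eval (f : Nat) : ∀ (n : Nat) (zc c : Int), 1 ≤ n → n ≤ f →
    solutionLoop f (binChars n) zc c = (c + (stepsFn n : Int), zc + (zerFn n : Int)) := by
  induction f with
  | zero => intro n _ _ h1 h2; omega
  | succ f ih =>
    intro n zc c h1 hf
    rw [solutionLoop]
    by_cases hone : n = 1
    · subst hone
      rw [if_pos ((binChars_eq_one_iff 1).2 rfl)]
      rw [stepsFn, zerFn]; norm_num
    · rw [if_neg (fun hc => hone ((binChars_eq_one_iff n).1 hc))]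
      simp only
      rw [binChars_filter_length n h1, binChars_count0 n h1]
      have hp1 : 1 ≤ popCount n := popCount_pos n h1
      have hplt : popCount n < n := popCount_lt n (by omega)
      rw [ih (popCount n) _ _ hp1 (by omega)]
      have hs : stepsFn n = stepsFn (popCount n) + 1 := by
        rw [stepsFn]; simp [show ¬ n ≤ 1 by omega]
      have hz : zerFn n = zerFn (popCount n) + (bitLen n - popCount n) := by
        rw [zerFn]; simp [show ¬ n ≤ 1 by omega]
      have hle := popCount_le_bitLen n
      rw [hs, hz]
      simp only [Prod.mk.injEq]
      constructor <;> push_cast <;> omega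

-- ---- B-side: the table invariant ----

-- after processing k = 1..m: pc/bl are correct up to m; steps/zer are correct up to m AND at
-- index 1 (never written there: initial 0 = stepsFn 1 = zerFn 1).
def TabInv (n m : Nat) (st : List Nat × List Nat × List Nat × List Nat) : Prop :=
  st.1.length = n + 1 ∧ st.2.1.length = n + 1 ∧ st.2.2.1.length = n + 1 ∧ st.2.2.2.length = n + 1 ∧
  (∀ k, k ≤ m → st.1.getD k 0 = popCount k ∧ st.2.1.getD k 0 = bitLen k) ∧
  (∀ k, k ≤ m ∨ k = 1 → st.2.2.1.getD k 0 = stepsFn k ∧ st.2.2.2.getD k 0 = zerFn k)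

theorem getD_set_self (l : List Nat) (i : Nat) (v : Nat) (h : i < l.length) :
    (l.set i v).getD i 0 = v := by
  simp [List.getD, h]

theorem getD_set_ne (l : List Nat) (i j : Nat) (v : Nat) (h : i ≠ j) :
    (l.set i v).getD j 0 = l.getD j 0 := by
  simp [List.getD, List.getElem?_set_ne h]

theorem stepsFn_le_one (k : Nat) (h : k ≤ 1) : stepsFn k = 0 := by rw [stepsFn]; simp [h]

theorem zerFn_le_one (k : Nat) (h : k ≤ 1) : zerFn k = 0 := by rw [zerFn]; simp [h]

theorem tabInv_step (n m : Nat) (st : List Nat × List Nat × List Nat × List Nat)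
    (hm : m < n) (hinv : TabInv n m st) : TabInv n (m + 1) (tabStep st (m + 1)) := by
  obtain ⟨h1, h2, h3, h4, hpb, hsz⟩ := hinv
  have hhalf : (m + 1) / 2 ≤ m := by omega
  obtain ⟨hpc2, hbl2⟩ := hpb ((m + 1) / 2) hhalf
  have hpck : st.1.getD ((m + 1) / 2) 0 + (m + 1) % 2 = popCount (m + 1) := by
    rw [hpc2]
    conv_rhs => rw [popCount]
    simp only [dif_neg (show m + 1 ≠ 0 by omega)]
    omega
  have hblk : st.2.1.getD ((m + 1) / 2) 0 + 1 = bitLen (m + 1) := by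
    rw [hbl2]
    conv_rhs => rw [bitLen]
    rw [dif_neg (show m + 1 ≠ 0 by omega)]
  unfold tabStep
  by_cases hm1 : m + 1 > 1
  · rw [if_pos hm1]
    have hppos : 1 ≤ popCount (m + 1) := popCount_pos (m + 1) (by omega)
    have hplt : popCount (m + 1) < m + 1 := popCount_lt (m + 1) (by omega)
    obtain ⟨hst2, hzr2⟩ := hsz (popCount (m + 1)) (Or.inl (by omega))
    refine ⟨by simpa using h1, by simpa using h2, by simpa using h3, by simpa using h4, ?_, ?_⟩
    · intro k hkle
      by_cases hke : k = m + 1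
      · subst hke
        exact ⟨by rw [getD_set_self _ _ _ (by omega), hpck],
          by rw [getD_set_self _ _ _ (by omega), hblk]⟩
      · have hne : m + 1 ≠ k := fun h => hke h.symm
        obtain ⟨a, b⟩ := hpb k (by omega)
        exact ⟨by rw [getD_set_ne _ _ _ _ hne, a], by rw [getD_set_ne _ _ _ _ hne, b]⟩
    · intro k hkle
      by_cases hke : k = m + 1
      · subst hke
        refine ⟨?_, ?_⟩
        · rw [getD_set_self _ _ _ (by omega), hpck, hst2]
          conv_rhs => rw [stepsFn]
          simp [show ¬ m + 1 ≤ 1 by omega]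
        · rw [getD_set_self _ _ _ (by omega), hpck, hblk, hzr2]
          conv_rhs => rw [zerFn]
          simp [show ¬ m + 1 ≤ 1 by omega]
      · have hne : m + 1 ≠ k := fun h => hke h.symm
        obtain ⟨cc, d⟩ := hsz k (by omega)
        exact ⟨by rw [getD_set_ne _ _ _ _ hne, cc], by rw [getD_set_ne _ _ _ _ hne, d]⟩
  · -- m + 1 = 1: steps/zer are unchanged; pc/bl are written at index 1
    have hm0 : m = 0 := by omega
    rw [if_neg hm1]
    subst hm0
    refine ⟨by simpa using h1, by simpa using h2, h3, h4, ?_, ?_⟩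
    · intro k hkle
      interval_cases k
      · obtain ⟨a, b⟩ := hpb 0 (le_refl 0)
        exact ⟨by rw [getD_set_ne _ _ _ _ (by omega), a],
          by rw [getD_set_ne _ _ _ _ (by omega), b]⟩
      · exact ⟨by rw [getD_set_self _ _ _ (by omega), hpck],
          by rw [getD_set_self _ _ _ (by omega), hblk]⟩
    · intro k hkle
      have hk1 : k ≤ 1 := by omega
      exact hsz k (by omega)

theorem tabInv_fold (n : Nat) (m : Nat) (hm : m ≤ n) :
    TabInv n m ((List.range' 1 m).foldl tabStep
      (List.replicate (n+1) 0, List.replicate (n+1) 0, List.replicate (n+1) 0, List.replicate (n+1) 0)) := by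
  induction m with
  | zero =>
    refine ⟨by simp, by simp, by simp, by simp, ?_, ?_⟩
    · intro k hk
      interval_cases k
      refine ⟨by simp [List.getD, popCount_zero], ?_⟩
      have hb : bitLen 0 = 0 := by rw [bitLen]; simp
      simp [List.getD, hb]
    · intro k hk
      have hk1 : k ≤ 1 := by rcases hk with hk | hk <;> omega
      constructor <;>
        simp [stepsFn_le_one k hk1, zerFn_le_one k hk1]
  | succ m ih =>
    rw [List.range'_concat, List.foldl_append]
    simp only [Nat.one_mul, List.foldl_cons, List.foldl_nil]
    rw [show 1 + m = m + 1 from by omega]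
    exact tabInv_step n m _ (by omega) (ih (by omega))

theorem countP_sum (l : List Char) : l.countP (· ≠ '0') + l.count '0' = l.length := by
  induction l with
  | nil => simp
  | cons c t iht =>
    simp only [ne_eq, decide_not] at iht
    by_cases hc : c = '0'
    · subst hc
      simp only [List.countP_cons, List.count_cons, List.length_cons]
      simp; omega
    · simp only [List.countP_cons, List.count_cons, List.length_cons]
      simp [hc]; omega

theorem countP_ne_zero (l : List Char) :
    (l.filter (· ≠ '0')).length = l.length - l.count '0' := by
  have hfl : (l.filter (· ≠ '0')).length = l.countP (· ≠ '0') :=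
    List.countP_eq_length_filter.symm
  have hsum := countP_sum l
  omega

theorem solution_eq (s : String) (hpre : Pre_solution s) :
    solution s = solution_alt s := by
  unfold solution solution_alt
  by_cases h1 : s = "1"
  · subst h1
    rw [if_pos rfl, solutionLoop, if_pos (by decide)]
  · rw [if_neg h1]
    have hlist : s.toList ≠ ['1'] := by
      intro hc
      exact h1 (String.toList_inj.mp (by rw [hc]; decide))
    rw [solutionLoop, if_neg hlist]
    simp only
    rw [countP_ne_zero s.toList]
    set n := s.toList.length - s.toList.count '0' with hn
    have hpos : 1 ≤ n := by
      unfold Pre_solution at hpre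
      rw [List.any_eq_true] at hpre
      obtain ⟨c, hc, hcne⟩ := hpre
      have hm : c ∈ s.toList.filter (· ≠ '0') := by
        rw [List.mem_filter]; exact ⟨hc, by simpa using hcne⟩
      have := List.length_pos_of_mem hm
      have := countP_ne_zero s.toList
      omega
    rw [loopA_eval (s.toList.length + 1) n _ _ hpos
      (by have : s.toList.count '0' ≤ s.toList.length := List.count_le_length; omega)]
    obtain ⟨-, -, -, -, -, hsz⟩ := tabInv_fold n n (le_refl n)
    obtain ⟨hst, hzr⟩ := hsz n (Or.inl (le_refl n))
    simp only [hst, hzr, Prod.mk.injEq]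
    constructor <;> push_cast <;> omega

-- ===== VERDICT (by name: the statement is the Claim_ definition above) =====
theorem solution_spec : Claim_equal_solution := by
  intro s _ hpre
  unfold Spec_solution
  exact solution_eq s hpre
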